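-- pv_equiv track=rewrite | github.com/MolfarUA/CodeWars_Solutions | 6 kyu/Last Survivors Ep.2/solution.py | last_survivors
-- ===== SOURCE A (Python) =====
-- def last_survivors(string):
--     m="llkklklk"
--     nn=sorted(string)
--     n=''.join(nn)
--     while ''.join(sorted(set(m))) != ''.join(sorted(m)):
--         for i in n:
--             if n.count(i)>=2:
--                 if i=="z":
--                     n=n.replace(i*2,"a")
--                 else:
--                     n=n.replace(i*2,chr(ord(i)+1))
--         m=n
--         n=''.join(sorted(n))
--     return n
-- ===== SOURCE B (Python) =====
-- def last_survivors(string):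
--     counts = {}
--     for ch in string:
--         counts[ch] = counts.get(ch, 0) + 1
--     changed = True
--     while changed:
--         changed = False
--         for c in list(counts):
--             q, r = divmod(counts[c], 2)
--             if q:
--                 counts[c] = r
--                 nc = "a" if c == "z" else chr(ord(c) + 1)
--                 counts[nc] = counts.get(nc, 0) + q
--                 changed = True
--     return "".join(sorted(c for c in counts if counts[c] == 1))
-- ===== Notes on version B (the rewrite author's own statement) =====
-- stated objective: faster
-- what changed: B replaces A's repeated sort+count+string-replace passes with a single character-count dictionary on which pair-carries (two of c become the next char, zz becomes a) are applied in batch sweeps until stable; the result is the sorted chars of count one (the carry normal form is unique, so the firing order does not matter).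
import Mathlib
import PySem

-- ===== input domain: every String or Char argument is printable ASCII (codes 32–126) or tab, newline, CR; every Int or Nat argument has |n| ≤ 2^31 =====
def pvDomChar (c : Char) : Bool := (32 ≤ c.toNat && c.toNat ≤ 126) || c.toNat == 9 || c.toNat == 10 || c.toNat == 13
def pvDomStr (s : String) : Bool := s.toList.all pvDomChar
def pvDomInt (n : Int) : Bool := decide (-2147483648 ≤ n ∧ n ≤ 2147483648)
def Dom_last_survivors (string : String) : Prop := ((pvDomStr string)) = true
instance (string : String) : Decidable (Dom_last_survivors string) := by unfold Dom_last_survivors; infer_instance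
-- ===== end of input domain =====

-- B replaces A's repeated sort+count+string.replace passes by one character-count
-- dictionary on which pair-carries are applied in batch sweeps until stable.

-- ===== PORT A =====
-- sorted(xs) over characters (Python compares a string's characters by code point);
-- ''.join of a list of 1-character strings is ported as the character list itself.
def sortedC (l : List Char) : List Char := PySem.List.sorted l (fun x => x)

-- body of A's inner `for i in n:` loop; the state is the current string n (as chars).
def aStep (cur : List Char) (i : Char) : List Char :=
  if 2 ≤ PySem.Chars.count cur [i] then
    if i = 'z' then PySem.Chars.replace cur [i, i] ['a']
    else PySem.Chars.replace cur [i, i] [Char.ofNat (i.toNat + 1)]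
  else cur

-- `for i in n: …` — Python iterates over the string object n held at loop entry while
-- the name n is rebound inside; so: fold aStep over the entry list, state starts at n.
def aPass (n : List Char) : List Char := List.foldl aStep n n

-- ---- helper lemmas cited by aLoop's termination proof (the port needs them) ----

-- structural form of s.replace(i+i, c): all non-overlapping occurrences, left to right
def replPair (i c : Char) : List Char → List Char
  | a :: b :: t => if a = i ∧ b = i then c :: replPair i c t else a :: replPair i c (b :: t)
  | l => l
termination_by l => l.length

-- the character two copies of c merge into (A writes the two branches out)
def nxt (c : Char) : Char := if c = 'z' then 'a' else Char.ofNat (c.toNat + 1)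

-- an adjacent equal pair i,i occurs in l
def hasPair' (i : Char) (l : List Char) : Prop := ∃ t₁ t₂, l = t₁ ++ i :: i :: t₂

theorem count_go_singleton (i : Char) : ∀ (fuel : Nat) (l : List Char) (acc : Nat),
    l.length ≤ fuel → PySem.Chars.count.go [i] fuel l acc = acc + l.count i := by
  intro fuel
  induction fuel with
  | zero =>
    intro l acc h
    have : l = [] := List.length_eq_zero_iff.mp (Nat.le_zero.mp h)
    subst this; simp [PySem.Chars.count.go]
  | succ f ih =>
    intro l acc h
    cases l with
    | nil => simp [PySem.Chars.count.go]
    | cons a t =>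
      rw [PySem.Chars.count.go]
      by_cases hai : i = a
      · subst hai
        have hp : ([i].isPrefixOf (i :: t)) = true := by simp [List.isPrefixOf]
        rw [hp]
        simp only [if_true]
        show PySem.Chars.count.go [i] f t (acc + 1) = _
        rw [ih t (acc+1) (by simpa using h)]
        simp [List.count_cons]
        omega
      · have : ([i].isPrefixOf (a :: t)) = false := by
          simp [List.isPrefixOf, hai]
        rw [this]
        simp only [Bool.false_eq_true, if_false]
        rw [ih t acc (by simpa using h)]
        simp [List.count_cons, Ne.symm hai]

theorem chars_count_singleton (i : Char) (l : List Char) :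
    PySem.Chars.count l [i] = l.count i := by
  rw [PySem.Chars.count]
  simp only [List.isEmpty_cons, Bool.false_eq_true, if_false]
  rw [count_go_singleton i l.length l 0 le_rfl]
  omega

theorem replace_go_eq (i c : Char) : ∀ (fuel : Nat) (l acc : List Char),
    l.length ≤ fuel →
    PySem.Chars.replace.go [i, i] [c] fuel l acc = acc.reverse ++ replPair i c l := by
  intro fuel
  induction fuel with
  | zero =>
    intro l acc h
    have : l = [] := List.length_eq_zero_iff.mp (Nat.le_zero.mp h)
    subst this; simp [PySem.Chars.replace.go, replPair]
  | succ f ih =>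
    intro l acc h
    cases l with
    | nil => simp [PySem.Chars.replace.go, replPair]
    | cons a t =>
      rw [PySem.Chars.replace.go]
      cases t with
      | nil =>
        have hp : ([i, i].isPrefixOf [a]) = false := by simp [List.isPrefixOf]
        rw [hp]
        simp only [Bool.false_eq_true, if_false]
        rw [ih [] (a :: acc) (by simp)]
        simp [replPair]
      | cons b t' =>
        by_cases hab : a = i ∧ b = i
        · obtain ⟨ha, hb⟩ := hab
          have hp : ([i, i].isPrefixOf (a :: b :: t')) = true := by
            simp [List.isPrefixOf, ha, hb]
          rw [hp]
          simp only [if_true]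
          show PySem.Chars.replace.go [i, i] [c] f t' ([c].reverse ++ acc) = _
          rw [ih t' ([c].reverse ++ acc) (by simp at h ⊢; omega)]
          rw [replPair]
          rw [if_pos ⟨ha, hb⟩]
          simp
        · have hp : ([i, i].isPrefixOf (a :: b :: t')) = false := by
            simp [List.isPrefixOf]
            intro h1 h2; exact hab ⟨h1.symm, h2.symm⟩
          rw [hp]
          simp only [Bool.false_eq_true, if_false]
          rw [ih (b :: t') (a :: acc) (by simp at h ⊢; omega)]
          rw [replPair]
          simp [if_neg hab]

theorem replace_eq_replPair (i c : Char) (l : List Char) :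
    PySem.Chars.replace l [i, i] [c] = replPair i c l := by
  rw [PySem.Chars.replace]
  simp only [List.isEmpty_cons, Bool.false_eq_true, if_false]
  rw [replace_go_eq i c l.length l [] le_rfl]
  simp

theorem replPair_length_le (i c : Char) (l : List Char) :
    (replPair i c l).length ≤ l.length := by
  induction l using replPair.induct i with
  | case1 a b t hab ih => rw [replPair, if_pos hab]; simp; omega
  | case2 a b t hab ih => rw [replPair, if_neg hab]; simpa using ih
  | case3 l h =>
    cases l with
    | nil => simp [replPair]
    | cons a t =>
      cases t with
      | nil => simp [replPair]
      | cons b t' => exact absurd rfl (by intro hh; exact h a b t' hh)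

theorem replPair_eq_of_length (i c : Char) (l : List Char)
    (h : (replPair i c l).length = l.length) : replPair i c l = l := by
  induction l using replPair.induct i with
  | case1 a b t hab ih =>
    exfalso
    rw [replPair, if_pos hab] at h
    have := replPair_length_le i c t
    simp at h
    omega
  | case2 a b t hab ih =>
    rw [replPair, if_neg hab] at h ⊢
    simp at h
    rw [ih h]
  | case3 l h' =>
    cases l with
    | nil => simp [replPair]
    | cons a t =>
      cases t with
      | nil => simp [replPair]
      | cons b t' => exact absurd rfl (by intro hh; exact h' a b t' hh)

theorem replPair_length_lt (i c : Char) (l : List Char) (h : hasPair' i l) :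
    (replPair i c l).length < l.length := by
  induction l using replPair.induct i with
  | case1 a b t hab ih =>
    rw [replPair, if_pos hab]
    have := replPair_length_le i c t
    simp; omega
  | case2 a b t hab ih =>
    rw [replPair, if_neg hab]
    obtain ⟨t₁, t₂, he⟩ := h
    cases t₁ with
    | nil => simp at he; exact absurd ⟨he.1, he.2.1⟩ hab
    | cons x t₁' =>
      simp only [List.cons_append] at he
      have : hasPair' i (b :: t) := ⟨t₁', t₂, by simpa using congrArg List.tail he⟩
      have := ih this
      simpa using this
  | case3 l hm =>
    exfalso
    obtain ⟨t₁, t₂, he⟩ := h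
    cases t₁ with
    | nil => exact hm i i t₂ he
    | cons x t₁' =>
      cases t₁' with
      | nil => exact hm x i (i :: t₂) he
      | cons y t₁'' => exact hm x y (t₁'' ++ i :: i :: t₂) (by simpa using he)

theorem sorted_count_hasPair (i : Char) (l : List Char)
    (hs : l.Pairwise (· ≤ ·)) (hc : 2 ≤ l.count i) : hasPair' i l := by
  induction l with
  | nil => simp at hc
  | cons a t ih =>
    rcases List.pairwise_cons.mp hs with ⟨ha, ht⟩
    by_cases hai : a = i
    · subst hai
      have h1 : 1 ≤ t.count a := by
        rw [List.count_cons] at hc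
        simp at hc
        exact List.count_pos_iff.mpr hc
      have hmem : a ∈ t := List.count_pos_iff.mp (by omega)
      cases t with
      | nil => simp at hmem
      | cons b t' =>
        by_cases hba : b = a
        · exact ⟨[], t', by rw [hba]; rfl⟩
        · exfalso
          have hab : a ≤ b := ha b (by simp)
          have hmem' : a ∈ t' := by
            rcases List.mem_cons.mp hmem with h | h
            · exact absurd h.symm hba
            · exact h
          have hba' : b ≤ a := (List.pairwise_cons.mp ht).1 a hmem'
          exact hba (le_antisymm hba' hab)
    · have : 2 ≤ t.count i := by
        rw [List.count_cons] at hc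
        simp only [beq_iff_eq] at hc
        rw [if_neg hai] at hc
        omega
      obtain ⟨t₁, t₂, he⟩ := ih ht this
      exact ⟨a :: t₁, t₂, by rw [he]; rfl⟩

theorem aStep_eq (cur : List Char) (i : Char) :
    aStep cur i = if 2 ≤ cur.count i then replPair i (nxt i) cur else cur := by
  rw [aStep, chars_count_singleton]
  split
  · rw [nxt]
    split
    · rw [replace_eq_replPair]
    · rw [replace_eq_replPair]
  · rfl

theorem aStep_length_le (cur : List Char) (i : Char) :
    (aStep cur i).length ≤ cur.length := by
  rw [aStep_eq]
  split
  · exact replPair_length_le _ _ _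
  · exact le_rfl

theorem aStep_eq_of_length (cur : List Char) (i : Char)
    (h : (aStep cur i).length = cur.length) : aStep cur i = cur := by
  rw [aStep_eq] at h ⊢
  split at h
  · rw [if_pos ‹_›]; exact replPair_eq_of_length _ _ _ h
  · rw [if_neg ‹_›]

theorem foldl_aStep_length_le (l a : List Char) :
    (List.foldl aStep a l).length ≤ a.length := by
  induction l generalizing a with
  | nil => simp
  | cons x t ih => exact le_trans (ih (aStep a x)) (aStep_length_le a x)

theorem foldl_aStep_eq_of_length (l a : List Char)
    (h : (List.foldl aStep a l).length = a.length) :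
    List.foldl aStep a l = a ∧ ∀ x ∈ l, aStep a x = a := by
  induction l generalizing a with
  | nil => exact ⟨rfl, by simp⟩
  | cons x t ih =>
    simp only [List.foldl_cons] at h ⊢
    have h1 : (List.foldl aStep (aStep a x) t).length ≤ (aStep a x).length :=
      foldl_aStep_length_le t (aStep a x)
    have h2 : (aStep a x).length ≤ a.length := aStep_length_le a x
    have hx : aStep a x = a := aStep_eq_of_length a x (by omega)
    rw [hx] at h ⊢
    obtain ⟨hf, hall⟩ := ih a h
    exact ⟨hf, by
      intro y hy
      rcases List.mem_cons.mp hy with rfl | hy'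
      · exact hx
      · exact hall y hy'⟩

theorem aPass_eq_self (l : List Char) (hs : l.Pairwise (· ≤ ·))
    (h : (aPass l).length = l.length) : aPass l = l ∧ l.Nodup := by
  obtain ⟨hf, hall⟩ := foldl_aStep_eq_of_length l l h
  refine ⟨hf, ?_⟩
  by_contra hnd
  obtain ⟨i, hi⟩ : ∃ i, 2 ≤ l.count i := by
    by_contra hno
    push_neg at hno
    exact hnd (List.nodup_iff_count_le_one.mpr (fun x => by have := hno x; omega))
  have hmem : i ∈ l := List.count_pos_iff.mp (by omega)
  have hstep := hall i hmem
  rw [aStep_eq, if_pos hi] at hstep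
  have := replPair_length_lt i (nxt i) l (sorted_count_hasPair i l hs hi)
  rw [hstep] at this
  omega

theorem length_sortedC (l : List Char) : (sortedC l).length = l.length :=
  (PySem.List.sorted_perm l (fun x => x) false).length_eq

theorem sortedC_sortedC (l : List Char) : sortedC (sortedC l) = sortedC l :=
  PySem.List.sorted_sorted l (fun x => x)

theorem ofList_eq_self_of_nodup (m : List Char) (h : m.Nodup) :
    PySem.Set.ofList m = m := by
  rw [PySem.Set.ofList_eq_foldl]
  have : ∀ x ∈ m, x ∉ ([] : List Char) := by simp
  have := PySem.Set.update_eq_append_of_disjoint ([] : PySem.Set Char) m h this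
  rw [PySem.Set.update] at this
  simpa using this

theorem cond_eq_nodup (m : List Char) :
    sortedC (PySem.Set.ofList m) = sortedC m ↔ m.Nodup := by
  rw [sortedC, sortedC, PySem.List.sorted_id_eq_sorted_id_iff_perm]
  constructor
  · intro h
    exact h.nodup_iff.mp (PySem.Set.nodup_ofList m)
  · intro h
    rw [ofList_eq_self_of_nodup m h]

-- A's while loop (m, n as in the source).  The loop condition compares
-- ''.join(sorted(set(m))) with ''.join(sorted(m)), i.e. the two char lists.
def aLoop (m n : List Char) : List Char :=
  if sortedC (PySem.Set.ofList m) ≠ sortedC m then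
    aLoop (aPass n) (sortedC (aPass n))
  else n
termination_by 4 * n.length + (if sortedC n = n then 0 else 2) +
  (if sortedC (PySem.Set.ofList m) ≠ sortedC m then 1 else 0)
decreasing_by
  rename_i h
  have hle : (aPass n).length ≤ n.length := foldl_aStep_length_le n n
  have e1 : (sortedC (aPass n)).length = (aPass n).length := length_sortedC _
  have e2 : sortedC (sortedC (aPass n)) = sortedC (aPass n) := sortedC_sortedC _
  rw [if_pos h, e1, if_pos e2]
  rcases Nat.lt_or_ge (aPass n).length n.length with hlt | hge
  · have hb : (if sortedC (PySem.Set.ofList (aPass n)) ≠ sortedC (aPass n) then 1 else 0) ≤ 1 := by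
      split <;> omega
    have hb2 : (if sortedC n = n then 0 else 2) ≤ 2 := by split <;> omega
    omega
  · have heq : (aPass n).length = n.length := le_antisymm hle hge
    by_cases hsn : sortedC n = n
    · obtain ⟨hpe, hnd⟩ := aPass_eq_self n
        (by rw [← hsn]; exact PySem.List.sorted_pairwise n (fun x => x)) heq
      have hc : sortedC (PySem.Set.ofList (aPass n)) = sortedC (aPass n) := by
        rw [cond_eq_nodup, hpe]; exact hnd
      rw [if_neg (not_not_intro hc), if_pos hsn, heq]
      omega
    · have hb : (if sortedC (PySem.Set.ofList (aPass n)) ≠ sortedC (aPass n) then 1 else 0) ≤ 1 := by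
        split <;> omega
      rw [if_neg hsn]
      omega

-- m="llkklklk"; nn=sorted(string); n=''.join(nn); while …; return n
def last_survivors (string : String) : String :=
  String.mk (aLoop "llkklklk".toList (sortedC string.toList))

-- ===== PORT B =====
-- counts = {}; for ch in string: counts[ch] = counts.get(ch, 0) + 1
-- (the values are character counts, always non-negative in Python: ported as Nat;
-- Python's divmod(v, 2) on v ≥ 0 is Nat division and mod)
def bCounter (l : List Char) : PySem.Dict Char Nat :=
  List.foldl (fun d ch => d.insert ch (d.getD ch 0 + 1)) PySem.Dict.empty l

-- body of `for c in list(counts):` — q, r = divmod(counts[c], 2); if q: …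
def bStep (st : PySem.Dict Char Nat × Bool) (c : Char) : PySem.Dict Char Nat × Bool :=
  let v := st.1.getD c 0
  let q := v / 2
  let r := v % 2
  if q ≠ 0 then
    let d1 := st.1.insert c r
    let nc := if c = 'z' then 'a' else Char.ofNat (c.toNat + 1)
    (d1.insert nc (d1.getD nc 0 + q), true)
  else st

-- one sweep: changed = False; for c in list(counts): …  (list(counts) = key snapshot)
def bSweep (d : PySem.Dict Char Nat) : PySem.Dict Char Nat × Bool :=
  List.foldl bStep (d, false) d.keys

-- ---- helper lemmas cited by bLoop's termination proof (the port needs them) ----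

-- the multiset of characters a counts-dictionary represents
def MD (d : PySem.Dict Char Nat) : Multiset Char :=
  (d.items.map (fun p => Multiset.replicate p.2 p.1)).sum

theorem count_MD (d : PySem.Dict Char Nat) (hnd : d.keys.Nodup) (x : Char) :
    (MD d).count x = d.getD x 0 := by
  obtain ⟨l⟩ := d
  induction l with
  | nil => simp [MD, PySem.Dict.getD, PySem.Dict.get?]
  | cons p t ih =>
    obtain ⟨a, v⟩ := p
    simp only [PySem.Dict.keys, List.map_cons, List.nodup_cons] at hnd
    have ht : (PySem.Dict.mk t).keys.Nodup := hnd.2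
    have hih := ih ht
    rw [MD] at hih ⊢
    simp only [List.map_cons, List.sum_cons, Multiset.count_add, Multiset.count_replicate]
    rw [PySem.Dict.getD, PySem.Dict.get?_mk_cons]
    by_cases hax : a = x
    · subst hax
      simp only [BEq.rfl, if_true]
      have hnotin : a ∉ (PySem.Dict.mk t).keys := hnd.1
      have hc : (PySem.Dict.mk t).contains a = false := by
        by_contra hcc
        simp only [Bool.not_eq_false] at hcc
        exact hnotin ((PySem.Dict.contains_iff_mem_keys _ a).mp hcc)
      have h0 : (PySem.Dict.mk t).getD a 0 = 0 := PySem.Dict.getD_of_not_contains _ 0 hc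
      rw [hih, h0]
      rw [PySem.Dict.getD] at h0
      simp [h0]
    · have : (a == x) = false := by simp [hax]
      rw [this]
      simp only [Bool.false_eq_true, if_false]
      rw [if_neg hax]
      rw [hih]
      rw [PySem.Dict.getD]
      omega

theorem keys_insert_contains (d : PySem.Dict Char Nat) (k : Char) (v : Nat)
    (h : d.contains k = true) : (d.insert k v).keys = d.keys := by
  rw [PySem.Dict.insert, if_pos h]
  simp only [PySem.Dict.keys, List.map_map]
  apply List.map_congr_left
  intro p _
  by_cases hp : p.1 = k
  · simp [hp]
  · simp [hp]

theorem keys_insert_not_contains (d : PySem.Dict Char Nat) (k : Char) (v : Nat)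
    (h : d.contains k = false) : (d.insert k v).keys = d.keys ++ [k] := by
  rw [PySem.Dict.insert, if_neg (by simp [h])]
  simp [PySem.Dict.keys]

theorem nodup_keys_insert (d : PySem.Dict Char Nat) (k : Char) (v : Nat)
    (hnd : d.keys.Nodup) : (d.insert k v).keys.Nodup := by
  cases hc : d.contains k with
  | true => rw [keys_insert_contains d k v hc]; exact hnd
  | false =>
    rw [keys_insert_not_contains d k v hc]
    have hk : k ∉ d.keys := fun hk =>
      by simp [(PySem.Dict.contains_iff_mem_keys d k).mpr hk] at hc
    simp [List.nodup_append, hnd]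
    exact fun a ha hak => hk (hak ▸ ha)

theorem MD_insert (d : PySem.Dict Char Nat) (k : Char) (v : Nat) (hnd : d.keys.Nodup) :
    MD (d.insert k v) + Multiset.replicate (d.getD k 0) k = MD d + Multiset.replicate v k := by
  ext x
  simp only [Multiset.count_add, Multiset.count_replicate]
  rw [count_MD _ (nodup_keys_insert d k v hnd), count_MD d hnd,
    PySem.Dict.getD_insert]
  by_cases hx : x = k
  · subst hx; simp; omega
  · simp [hx, Ne.symm hx]

theorem bStep_nodup (st : PySem.Dict Char Nat × Bool) (c : Char)
    (hnd : st.1.keys.Nodup) : (bStep st c).1.keys.Nodup := by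
  rw [bStep]
  split
  · exact nodup_keys_insert _ _ _ (nodup_keys_insert _ _ _ hnd)
  · exact hnd

-- the multiset change of one firing step of B

theorem bStep_MD (st : PySem.Dict Char Nat × Bool) (c : Char) (hnd : st.1.keys.Nodup)
    (h : st.1.getD c 0 / 2 ≠ 0) :
    MD (bStep st c).1 + Multiset.replicate (st.1.getD c 0) c
      = MD st.1 + Multiset.replicate (st.1.getD c 0 % 2) c
        + Multiset.replicate (st.1.getD c 0 / 2) (nxt c) := by
  rw [bStep]
  simp only [if_pos h]
  set d := st.1 with hd
  set v := d.getD c 0 with hv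
  set q := v / 2 with hq
  set r := v % 2 with hr
  set d1 := d.insert c r with hd1
  have h1 : MD d1 + Multiset.replicate v c = MD d + Multiset.replicate r c :=
    MD_insert d c r hnd
  have hnd1 : d1.keys.Nodup := nodup_keys_insert _ _ _ hnd
  have h2 := MD_insert d1 (if c = 'z' then 'a' else Char.ofNat (c.toNat + 1))
    (d1.getD (if c = 'z' then 'a' else Char.ofNat (c.toNat + 1)) 0 + q) hnd1
  rw [Multiset.replicate_add] at h2
  have h2' : MD (d1.insert (if c = 'z' then 'a' else Char.ofNat (c.toNat + 1))
      (d1.getD (if c = 'z' then 'a' else Char.ofNat (c.toNat + 1)) 0 + q))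
      = MD d1 + Multiset.replicate q (if c = 'z' then 'a' else Char.ofNat (c.toNat + 1)) := by
    have := h2
    rw [add_comm (Multiset.replicate _ _) (Multiset.replicate q _), ← add_assoc] at this
    exact add_right_cancel this
  rw [h2']
  show MD d1 + Multiset.replicate q (nxt c) + Multiset.replicate v c = _
  rw [add_comm (MD d1) _, add_assoc, h1]
  rw [nxt]
  abel

theorem bStep_card (st : PySem.Dict Char Nat × Bool) (c : Char) (hnd : st.1.keys.Nodup) :
    (MD (bStep st c).1).card ≤ (MD st.1).card ∧
      ((bStep st c).2 = true → st.2 = true ∨ (MD (bStep st c).1).card < (MD st.1).card) := by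
  by_cases h : st.1.getD c 0 / 2 ≠ 0
  · have := congrArg Multiset.card (bStep_MD st c hnd h)
    simp only [Multiset.card_add, Multiset.card_replicate] at this
    have hv : 2 ≤ st.1.getD c 0 := by omega
    constructor
    · omega
    · intro _; right; omega
  · rw [bStep, if_neg h]
    exact ⟨le_rfl, fun ht => Or.inl ht⟩

theorem bFold_card (ks : List Char) (st : PySem.Dict Char Nat × Bool)
    (hnd : st.1.keys.Nodup) :
    (List.foldl bStep st ks).1.keys.Nodup ∧
      (MD (List.foldl bStep st ks).1).card ≤ (MD st.1).card ∧
      ((List.foldl bStep st ks).2 = true →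
        st.2 = true ∨ (MD (List.foldl bStep st ks).1).card < (MD st.1).card) := by
  induction ks generalizing st with
  | nil => exact ⟨hnd, le_rfl, fun h => Or.inl h⟩
  | cons k t ih =>
    simp only [List.foldl_cons]
    obtain ⟨hnd1, hle1, hch1⟩ := ih (bStep st k) (bStep_nodup st k hnd)
    obtain ⟨hle0, hch0⟩ := bStep_card st k hnd
    refine ⟨hnd1, le_trans hle1 hle0, ?_⟩
    intro hc
    rcases hch1 hc with h | h
    · rcases hch0 h with h' | h'
      · exact Or.inl h'
      · exact Or.inr (lt_of_le_of_lt hle1 h')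
    · exact Or.inr (lt_of_lt_of_le h hle0)

-- changed = True; while changed: changed = False; for c in list(counts): …
-- (carries the keys-Nodup invariant, which a Python dict has by construction)
def bLoop (d : PySem.Dict Char Nat) (hnd : d.keys.Nodup) : PySem.Dict Char Nat :=
  if h : (bSweep d).2 then
    bLoop (bSweep d).1 (bFold_card d.keys (d, false) hnd).1
  else (bSweep d).1
termination_by (MD d).card
decreasing_by
  have hf := bFold_card d.keys (d, false) hnd
  rcases hf.2.2 h with h' | h'
  · exact absurd h' (by simp)
  · exact h'

theorem nodup_keys_bCounter (l : List Char) : (bCounter l).keys.Nodup := by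
  rw [bCounter]
  rw [PySem.Dict.keys_foldl_insert l (fun d ch => d.getD ch 0 + 1) PySem.Dict.empty]
  show (PySem.Set.update ((PySem.Dict.empty : PySem.Dict Char Nat)).keys l).Nodup
  have he : ((PySem.Dict.empty : PySem.Dict Char Nat)).keys = ([] : List Char) := rfl
  rw [he, PySem.Set.update, ← PySem.Set.ofList_eq_foldl]
  exact PySem.Set.nodup_ofList l

-- return ''.join(sorted(c for c in counts if counts[c] == 1))
def last_survivors_alt (string : String) : String :=
  let d := bLoop (bCounter string.toList) (nodup_keys_bCounter string.toList)
  String.mk (sortedC (d.keys.filter (fun c => d.getD c 0 == 1)))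

-- ===== PRECONDITION & SPEC =====
def Spec_last_survivors (string : String) (out : String) : Prop := out = last_survivors_alt string
instance (string : String) (out : String) : Decidable (Spec_last_survivors string out) := by unfold Spec_last_survivors; infer_instance

-- ===== CLAIM (what is proved, stated in full; the proofs are below) =====
def Claim_equal_last_survivors : Prop := ∀ (string : String), Dom_last_survivors string → Spec_last_survivors string (last_survivors string)

-- ===== LEMMAS AND PROOFS =====

-- abstract carry system: one "firing" replaces two c's by one nxt c; both programs
-- perform firings until no character occurs twice, and the normal form is unique.
def fire (c : Char) (s : Multiset Char) : Multiset Char :=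
  s - Multiset.replicate 2 c + {nxt c}

def StepR (s t : Multiset Char) : Prop := ∃ c, 2 ≤ s.count c ∧ t = fire c s

def Reach : Multiset Char → Multiset Char → Prop := Relation.ReflTransGen StepR

def NormalM (s : Multiset Char) : Prop := ∀ c, s.count c ≤ 1

def pick? (s : Multiset Char) : Option Char :=
  (s.sort (· ≤ ·)).find? (fun c => 2 ≤ s.count c)

theorem fire_decomp (c : Char) (u : Multiset Char) :
    fire c (Multiset.replicate 2 c + u) = u + {nxt c} := by
  rw [fire, add_tsub_cancel_left]

theorem decomp_of_count (c : Char) (s : Multiset Char) (n : Nat) (h : n ≤ s.count c) :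
    ∃ u, s = Multiset.replicate n c + u := by
  have hle : Multiset.replicate n c ≤ s := Multiset.le_count_iff_replicate_le.mp h
  exact ⟨s - Multiset.replicate n c, by rw [add_tsub_cancel_of_le hle]⟩

theorem stepR_of_decomp (c : Char) (s u : Multiset Char)
    (h : s = Multiset.replicate 2 c + u) : StepR s (u + {nxt c}) := by
  refine ⟨c, ?_, ?_⟩
  · rw [h]; simp [Multiset.count_replicate]
  · rw [h, fire_decomp]

theorem card_fire (c : Char) (s : Multiset Char) (h : 2 ≤ s.count c) :
    (fire c s).card + 1 = s.card := by
  obtain ⟨u, hu⟩ := decomp_of_count c s 2 h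
  rw [hu, fire_decomp]
  simp [Multiset.card_add]

theorem pick?_property (s : Multiset Char) (d : Char) (h : pick? s = some d) :
    2 ≤ s.count d := by
  have := List.find?_some h
  simpa using this

theorem pick?_isSome (s : Multiset Char) (c : Char) (h : 2 ≤ s.count c) :
    ∃ d, pick? s = some d := by
  have hmem : c ∈ s.sort (· ≤ ·) := by
    rw [Multiset.mem_sort]
    exact Multiset.count_pos.mp (by omega)
  have : ((s.sort (· ≤ ·)).find? (fun x => 2 ≤ s.count x)).isSome := by
    rw [List.find?_isSome]
    exact ⟨c, hmem, by simpa using h⟩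
  rcases ho : pick? s with _ | d
  · rw [pick?] at ho; rw [ho] at this; simp at this
  · exact ⟨d, rfl⟩

def carryNorm (s : Multiset Char) : Multiset Char :=
  match h : pick? s with
  | some c => carryNorm (fire c s)
  | none => s
termination_by s.card
decreasing_by
  have := card_fire c s (pick?_property s c h)
  omega

theorem norm_of_normal (s : Multiset Char) (h : NormalM s) : carryNorm s = s := by
  rw [carryNorm]
  rcases hp : pick? s with _ | d
  · rfl
  · exfalso
    have := pick?_property s d hp
    have := h d
    omega

theorem reach_add_left (u : Multiset Char) (s t : Multiset Char) (h : Reach s t) :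
    Reach (u + s) (u + t) := by
  induction h with
  | refl => exact Relation.ReflTransGen.refl
  | tail hst hstep ih =>
    rename_i b c'
    refine Relation.ReflTransGen.tail ih ?_
    obtain ⟨c, hc, rfl⟩ := hstep
    obtain ⟨w, hw⟩ := decomp_of_count c b 2 hc
    subst hw
    rw [fire_decomp]
    have : u + (Multiset.replicate 2 c + w) = Multiset.replicate 2 c + (u + w) := by abel
    rw [this]
    have := stepR_of_decomp c (Multiset.replicate 2 c + (u + w)) (u + w) rfl
    have he : u + w + {nxt c} = u + (w + {nxt c}) := by abel
    rw [he] at this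
    exact this

-- fire q times at once

theorem reach_fireMany (c : Char) (q r : Nat) :
    ∀ u, Reach (Multiset.replicate (2 * q + r) c + u)
      (Multiset.replicate r c + Multiset.replicate q (nxt c) + u) := by
  induction q with
  | zero =>
    intro u
    have : 2 * 0 + r = r := by omega
    rw [this]
    simp only [Multiset.replicate_zero]
    have e : Multiset.replicate r c + 0 + u = Multiset.replicate r c + u := by abel
    rw [e]
    exact Relation.ReflTransGen.refl
  | succ p ih =>
    intro u
    have hsplit : Multiset.replicate (2 * (p + 1) + r) c
        = Multiset.replicate 2 c + Multiset.replicate (2 * p + r) c := by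
      rw [← Multiset.replicate_add]
      congr 1
      omega
    rw [hsplit]
    have hstep := stepR_of_decomp c
      (Multiset.replicate 2 c + Multiset.replicate (2 * p + r) c + u)
      (Multiset.replicate (2 * p + r) c + u) (by abel)
    refine Relation.ReflTransGen.head hstep ?_
    have := ih (u + {nxt c})
    have e1 : Multiset.replicate (2 * p + r) c + u + {nxt c}
        = Multiset.replicate (2 * p + r) c + (u + {nxt c}) := by abel
    have e2 : Multiset.replicate r c + Multiset.replicate p (nxt c) + (u + {nxt c})
        = Multiset.replicate r c + Multiset.replicate (p + 1) (nxt c) + u := by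
      rw [Multiset.replicate_add]
      simp only [Multiset.replicate_one]
      abel
    rw [e1, ← e2]
    exact this

theorem norm_fire : ∀ (n : Nat) (s : Multiset Char) (c : Char), s.card = n →
    2 ≤ s.count c → carryNorm (fire c s) = carryNorm s := by
  intro n
  induction n using Nat.strong_induction_on with
  | _ n ihn =>
    intro s c hcard hc
    obtain ⟨d, hpick⟩ := pick?_isSome s c hc
    have hd : 2 ≤ s.count d := pick?_property s d hpick
    have hnorm_s : carryNorm s = carryNorm (fire d s) := by
      rw [carryNorm]
      split
      · rename_i c' h'
        rw [hpick] at h'; cases h'; rfl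
      · rename_i h'
        rw [hpick] at h'; cases h'
    by_cases hcd : c = d
    · subst hcd; exact hnorm_s.symm
    · -- decompose s
      obtain ⟨u₀, hu₀⟩ := decomp_of_count c s 2 hc
      have hdu : 2 ≤ u₀.count d := by
        have h' : 2 ≤ (Multiset.replicate 2 c + u₀).count d := hu₀ ▸ hd
        rw [Multiset.count_add, Multiset.count_replicate, if_neg (fun hh => hcd hh)] at h'
        omega
      obtain ⟨u, hu⟩ := decomp_of_count d u₀ 2 hdu
      have hs : s = Multiset.replicate 2 c + (Multiset.replicate 2 d + u) := by
        rw [hu₀, hu]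
      have hcard4 : 4 + u.card = s.card := by
        rw [hs]; simp; omega
      -- the two one-step reducts
      have hfc : fire c s = Multiset.replicate 2 d + u + {nxt c} := by
        rw [hs, fire_decomp]
      have hfd : fire d s = Multiset.replicate 2 c + u + {nxt d} := by
        have hs' : s = Multiset.replicate 2 d + (Multiset.replicate 2 c + u) := by
          rw [hs]; abel
        rw [hs', fire_decomp]
      -- counts in the reducts
      have hcd2 : 2 ≤ (fire c s).count d := by
        rw [hfc]; simp [Multiset.count_replicate]
      have hdc2 : 2 ≤ (fire d s).count c := by
        rw [hfd]; simp [Multiset.count_replicate]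
      -- cards
      have hccard : (fire c s).card = n - 1 := by
        have := card_fire c s hc; omega
      have hdcard : (fire d s).card = n - 1 := by
        have := card_fire d s hd; omega
      have hn1 : n - 1 < n := by omega
      -- commute
      have hcomm : fire d (fire c s) = fire c (fire d s) := by
        have h1 : fire c s = Multiset.replicate 2 d + (u + {nxt c}) := by
          rw [hfc]; abel
        have h2 : fire d s = Multiset.replicate 2 c + (u + {nxt d}) := by
          rw [hfd]; abel
        rw [h1, fire_decomp, h2, fire_decomp]
        abel
      calc carryNorm (fire c s)
          = carryNorm (fire d (fire c s)) := (ihn (n-1) hn1 (fire c s) d hccard hcd2).symm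
        _ = carryNorm (fire c (fire d s)) := by rw [hcomm]
        _ = carryNorm (fire d s) := ihn (n-1) hn1 (fire d s) c hdcard hdc2
        _ = carryNorm s := hnorm_s.symm

theorem reach_norm (s t : Multiset Char) (h : Reach s t) : carryNorm t = carryNorm s := by
  induction h with
  | refl => rfl
  | tail hst hstep ih =>
    obtain ⟨c, hc, rfl⟩ := hstep
    rw [norm_fire _ _ c rfl hc]
    exact ih

theorem normal_unique (s t : Multiset Char) (h : Reach s t) (hn : NormalM t) :
    t = carryNorm s := by
  rw [← reach_norm s t h, norm_of_normal t hn]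

-- ---- A reaches a normal form ----
theorem coe_cons_pair (i : Char) (t : List Char) :
    ((i :: i :: t : List Char) : Multiset Char) = Multiset.replicate 2 i + ↑t := by
  simp [Multiset.replicate_succ]

theorem reach_replPair (i : Char) (l : List Char) :
    Reach ↑l ↑(replPair i (nxt i) l) := by
  induction l using replPair.induct i with
  | case1 a b t hab ih =>
    obtain ⟨ha, hb⟩ := hab
    rw [replPair, if_pos ⟨ha, hb⟩]
    have e1 : ((a :: b :: t : List Char) : Multiset Char) = Multiset.replicate 2 i + ↑t := by
      rw [ha, hb]; exact coe_cons_pair i t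
    have e2 : ((nxt i :: replPair i (nxt i) t : List Char) : Multiset Char)
        = {nxt i} + ↑(replPair i (nxt i) t) := by simp
    rw [e1, e2]
    refine Relation.ReflTransGen.head (stepR_of_decomp i _ (↑t) rfl) ?_
    have hr := reach_add_left {nxt i} (↑t) (↑(replPair i (nxt i) t)) ih
    have e3 : ({nxt i} : Multiset Char) + ↑t = ↑t + {nxt i} := by abel
    rw [e3] at hr
    exact hr
  | case2 a b t hab ih =>
    rw [replPair, if_neg hab]
    have : ((a :: b :: t : List Char) : Multiset Char) = {a} + ↑(b :: t) := by simp
    rw [this]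
    have h2 : ((a :: replPair i (nxt i) (b :: t) : List Char) : Multiset Char)
        = {a} + ↑(replPair i (nxt i) (b :: t)) := by simp
    rw [h2]
    exact reach_add_left {a} _ _ ih
  | case3 l h => 
    cases l with
    | nil => simp [replPair]; exact Relation.ReflTransGen.refl
    | cons a t =>
      cases t with
      | nil => simp [replPair]; exact Relation.ReflTransGen.refl
      | cons b t' => exact absurd rfl (by intro hh; exact h a b t' hh)

theorem reach_aStep (cur : List Char) (i : Char) : Reach ↑cur ↑(aStep cur i) := by
  rw [aStep_eq]
  split
  · exact reach_replPair i cur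
  · exact Relation.ReflTransGen.refl

theorem reach_foldl_aStep (l : List Char) : ∀ a : List Char, Reach ↑a ↑(List.foldl aStep a l) := by
  induction l with
  | nil => intro a; exact Relation.ReflTransGen.refl
  | cons x t ih =>
    intro a
    exact Relation.ReflTransGen.trans (reach_aStep a x) (ih (aStep a x))

theorem aLoop_spec : ∀ m n : List Char, (↑n : Multiset Char) = ↑m → n.Pairwise (· ≤ ·) →
    Reach ↑n ↑(aLoop m n) ∧ (aLoop m n).Nodup ∧ (aLoop m n).Pairwise (· ≤ ·) := by
  intro m n
  induction m, n using aLoop.induct with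
  | case1 m n h ih =>
    intro hmn hp
    rw [aLoop, if_pos h]
    have hinv1 : (↑(sortedC (aPass n)) : Multiset Char) = ↑(aPass n) :=
      Multiset.coe_eq_coe.mpr (PySem.List.sorted_perm (aPass n) (fun x => x) false)
    have hinv2 : (sortedC (aPass n)).Pairwise (· ≤ ·) :=
      PySem.List.sorted_pairwise (aPass n) (fun x => x)
    obtain ⟨hr, hnd, hpw⟩ := ih hinv1 hinv2
    refine ⟨?_, hnd, hpw⟩
    have h1 : Reach ↑n ↑(aPass n) := reach_foldl_aStep n n
    have h2 : Reach ↑(sortedC (aPass n)) ↑(aLoop (aPass n) (sortedC (aPass n))) := hr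
    rw [hinv1] at h2
    exact Relation.ReflTransGen.trans h1 h2
  | case2 m n h =>
    intro hmn hp
    rw [aLoop, if_neg h]
    have hmnd : m.Nodup := (cond_eq_nodup m).mp (not_not.mp h)
    have hnnd : n.Nodup := (Multiset.coe_eq_coe.mp hmn).nodup_iff.mpr hmnd
    exact ⟨Relation.ReflTransGen.refl, hnnd, hp⟩

theorem last_survivors_char (string : String) :
    ∃ r : List Char, String.mk (aLoop "llkklklk".toList (sortedC string.toList)) = String.mk r
      ∧ (↑r : Multiset Char) = carryNorm ↑string.toList ∧ r.Pairwise (· ≤ ·) := by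
  set n0 := sortedC string.toList with hn0
  have hcond : sortedC (PySem.Set.ofList "llkklklk".toList) ≠ sortedC "llkklklk".toList := by
    decide
  rw [aLoop, if_pos hcond]
  set r := aLoop (aPass n0) (sortedC (aPass n0)) with hr
  obtain ⟨hreach, hnd, hpw⟩ := aLoop_spec (aPass n0) (sortedC (aPass n0))
    (Multiset.coe_eq_coe.mpr (PySem.List.sorted_perm (aPass n0) (fun x => x) false))
    (PySem.List.sorted_pairwise (aPass n0) (fun x => x))
  refine ⟨r, rfl, ?_, hpw⟩
  have h0 : (↑n0 : Multiset Char) = ↑string.toList :=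
    Multiset.coe_eq_coe.mpr (PySem.List.sorted_perm string.toList (fun x => x) false)
  have h1 : Reach ↑n0 ↑(aPass n0) := reach_foldl_aStep n0 n0
  have h2 : (↑(sortedC (aPass n0)) : Multiset Char) = ↑(aPass n0) :=
    Multiset.coe_eq_coe.mpr (PySem.List.sorted_perm (aPass n0) (fun x => x) false)
  rw [h2] at hreach
  have hfull : Reach ↑string.toList ↑r := by
    rw [← h0]
    exact Relation.ReflTransGen.trans h1 hreach
  have hnorm : NormalM ↑r := by
    intro c
    have := List.nodup_iff_count_le_one.mp hnd c
    simpa using this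
  exact normal_unique _ _ hfull hnorm

-- ---- B reaches a normal form ----
theorem reach_bStep (st : PySem.Dict Char Nat × Bool) (c : Char)
    (hnd : st.1.keys.Nodup) : Reach (MD st.1) (MD (bStep st c).1) := by
  by_cases h : st.1.getD c 0 / 2 ≠ 0
  · set v := st.1.getD c 0 with hv
    set q := v / 2 with hq
    set r := v % 2 with hr
    have hvqr : 2 * q + r = v := by omega
    have hMD := bStep_MD st c hnd h
    have hcnt : (MD st.1).count c = v := by rw [count_MD st.1 hnd c]
    obtain ⟨u, hu⟩ := decomp_of_count c (MD st.1) v (by omega)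
    have hreach := reach_fireMany c q r u
    rw [hvqr] at hreach
    rw [← hu] at hreach
    have hres : MD (bStep st c).1 = Multiset.replicate r c + Multiset.replicate q (nxt c) + u := by
      have : MD (bStep st c).1 + Multiset.replicate v c
          = (Multiset.replicate v c + u) + Multiset.replicate r c + Multiset.replicate q (nxt c) := by
        rw [hMD, hu]
      have h2 : MD (bStep st c).1 + Multiset.replicate v c
          = (Multiset.replicate r c + Multiset.replicate q (nxt c) + u) + Multiset.replicate v c := by
        rw [this]; abel
      exact add_right_cancel h2
    rw [hres]
    exact hreach
  · rw [bStep, if_neg h]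
    exact Relation.ReflTransGen.refl

theorem reach_bFold (ks : List Char) : ∀ st : PySem.Dict Char Nat × Bool,
    st.1.keys.Nodup → Reach (MD st.1) (MD (List.foldl bStep st ks).1) := by
  induction ks with
  | nil => intro st _; exact Relation.ReflTransGen.refl
  | cons k t ih =>
    intro st hnd
    exact Relation.ReflTransGen.trans (reach_bStep st k hnd)
      (ih (bStep st k) (bStep_nodup st k hnd))

theorem bFold_true (ks : List Char) : ∀ st : PySem.Dict Char Nat × Bool,
    st.2 = true → (List.foldl bStep st ks).2 = true := by
  induction ks with
  | nil => intro st h; exact h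
  | cons k t ih =>
    intro st h
    apply ih
    rw [bStep]
    split
    · rfl
    · exact h

theorem bFold_unchanged (ks : List Char) : ∀ st : PySem.Dict Char Nat × Bool,
    (List.foldl bStep st ks).2 = false →
    (List.foldl bStep st ks).1 = st.1 ∧ ∀ k ∈ ks, st.1.getD k 0 / 2 = 0 := by
  induction ks with
  | nil => intro st _; exact ⟨rfl, by simp⟩
  | cons k t ih =>
    intro st h
    simp only [List.foldl_cons] at h ⊢
    by_cases hq : st.1.getD k 0 / 2 ≠ 0
    · exfalso
      have : (bStep st k).2 = true := by rw [bStep, if_pos hq]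
      have := bFold_true t (bStep st k) this
      rw [this] at h; cases h
    · have hid : bStep st k = st := by rw [bStep, if_neg hq]
      rw [hid] at h ⊢
      obtain ⟨h1, h2⟩ := ih st h
      refine ⟨h1, ?_⟩
      intro x hx
      rcases List.mem_cons.mp hx with rfl | hx'
      · omega
      · exact h2 x hx'

theorem bLoop_spec : ∀ (d : PySem.Dict Char Nat) (hnd : d.keys.Nodup),
    Reach (MD d) (MD (bLoop d hnd)) ∧ (bLoop d hnd).keys.Nodup ∧
      ∀ x, (bLoop d hnd).getD x 0 ≤ 1 := by
  intro d hnd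
  induction d, hnd using bLoop.induct with
  | case1 d hnd h ih =>
    rw [bLoop, dif_pos h]
    obtain ⟨hr, hnd', hb⟩ := ih
    refine ⟨?_, hnd', hb⟩
    exact Relation.ReflTransGen.trans (reach_bFold d.keys (d, false) hnd) hr
  | case2 d hnd h =>
    rw [bLoop, dif_neg h]
    have hreach : Reach (MD d) (MD (bSweep d).1) := reach_bFold d.keys (d, false) hnd
    have hnd' : (bSweep d).1.keys.Nodup := (bFold_card d.keys (d, false) hnd).1
    obtain ⟨hid, hq⟩ := bFold_unchanged d.keys (d, false) (by simpa using h)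
    refine ⟨hreach, hnd', ?_⟩
    intro x
    show (bSweep d).1.getD x 0 ≤ 1
    rw [bSweep] at *
    rw [hid]
    by_cases hx : x ∈ d.keys
    · have := hq x hx
      omega
    · have hc : d.contains x = false := by
        by_contra hcc
        simp only [Bool.not_eq_false] at hcc
        exact hx ((PySem.Dict.contains_iff_mem_keys d x).mp hcc)
      rw [PySem.Dict.getD_of_not_contains d 0 hc]
      omega

theorem getD_foldl_insert_nat (l : List Char) (d : PySem.Dict Char Nat) (x : Char) :
    (List.foldl (fun d ch => d.insert ch (d.getD ch 0 + 1)) d l).getD x 0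
      = d.getD x 0 + l.count x := by
  induction l generalizing d with
  | nil => simp
  | cons a t ih =>
    simp only [List.foldl_cons]
    rw [ih, PySem.Dict.getD_insert, List.count_cons]
    by_cases hx : x = a
    · subst hx; simp; omega
    · simp [hx, Ne.symm hx]

theorem getD_bCounter (l : List Char) (x : Char) : (bCounter l).getD x 0 = l.count x := by
  rw [bCounter, getD_foldl_insert_nat]
  simp [PySem.Dict.getD, PySem.Dict.get?, PySem.Dict.empty]

-- ===== abstract carry system =====

theorem MD_bCounter (l : List Char) : MD (bCounter l) = ↑l := by
  ext x
  rw [count_MD (bCounter l) (nodup_keys_bCounter l) x, getD_bCounter]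
  simp

theorem coe_filter_MD (d : PySem.Dict Char Nat) (hnd : d.keys.Nodup)
    (hb : ∀ x, d.getD x 0 ≤ 1) :
    (↑(d.keys.filter (fun c => d.getD c 0 == 1)) : Multiset Char) = MD d := by
  ext x
  rw [count_MD d hnd x]
  have hfnd : (d.keys.filter (fun c => d.getD c 0 == 1)).Nodup := hnd.filter _
  have hcle := List.nodup_iff_count_le_one.mp hfnd x
  by_cases h1 : d.getD x 0 = 1
  · have hxk : x ∈ d.keys := by
      by_contra hx
      have hc : d.contains x = false := by
        by_contra hcc
        simp only [Bool.not_eq_false] at hcc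
        exact hx ((PySem.Dict.contains_iff_mem_keys d x).mp hcc)
      rw [PySem.Dict.getD_of_not_contains d 0 hc] at h1
      cases h1
    have hmem : x ∈ d.keys.filter (fun c => d.getD c 0 == 1) :=
      List.mem_filter.mpr ⟨hxk, by simp [h1]⟩
    have := List.count_pos_iff.mpr hmem
    have hcnt : (d.keys.filter (fun c => d.getD c 0 == 1)).count x = 1 := by omega
    rw [h1]
    simpa using hcnt
  · have h0 : d.getD x 0 = 0 := by have := hb x; omega
    have hnmem : x ∉ d.keys.filter (fun c => d.getD c 0 == 1) := by
      intro hmem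
      have := (List.mem_filter.mp hmem).2
      simp [h0] at this
    have hcnt : (d.keys.filter (fun c => d.getD c 0 == 1)).count x = 0 :=
      List.count_eq_zero.mpr hnmem
    rw [h0]
    simpa using hcnt

-- ===== VERDICT (by name: the statement is the Claim_ definition above) =====
theorem last_survivors_spec : Claim_equal_last_survivors := by
  intro string _
  unfold Spec_last_survivors
  obtain ⟨r, hmk, hrn, hrp⟩ := last_survivors_char string
  rw [last_survivors, hmk, last_survivors_alt]
  set d := bLoop (bCounter string.toList) (nodup_keys_bCounter string.toList) with hd
  obtain ⟨hreach, hnd, hb⟩ := bLoop_spec (bCounter string.toList) (nodup_keys_bCounter string.toList)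
  rw [MD_bCounter] at hreach
  have hnormal : NormalM (MD d) := by
    intro c
    rw [count_MD d hnd c]
    exact hb c
  have hMDnorm : MD d = carryNorm ↑string.toList := normal_unique _ _ hreach hnormal
  set f := d.keys.filter (fun c => d.getD c 0 == 1) with hf
  have hfeq : (↑f : Multiset Char) = carryNorm ↑string.toList := by
    rw [hf, coe_filter_MD d hnd hb, hMDnorm]
  have hsfeq : (↑(sortedC f) : Multiset Char) = carryNorm ↑string.toList := by
    rw [← hfeq]
    exact Multiset.coe_eq_coe.mpr (PySem.List.sorted_perm f (fun x => x) false)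
  have hperm : r.Perm (sortedC f) := Multiset.coe_eq_coe.mp (by rw [hrn, hsfeq])
  have hspw : (sortedC f).Pairwise (· ≤ ·) := PySem.List.sorted_pairwise f (fun x => x)
  have : r = sortedC f :=
    List.eq_of_perm_of_sorted (fun a b _ _ hab hba => le_antisymm hab hba) hrp hspw hperm
  rw [this]
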